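-- pv_equiv track=rewrite | github.com/GroguLovesCookies/MinecraftModdingTool | creation_windows/recipe_creator_window.py | get_pattern_from_list
-- ===== SOURCE A (Python) =====
-- def get_pattern_from_list(grid):
--     pattern = ""
--     available_symbols = "ABCDEFGHI"
--     key = {}
--     for item in grid[:9]:
--         if item == "minecraft:air":
--             pattern += " "
--         else:
--             if item not in key.keys():
--                 key[item] = available_symbols[len(key)]
--             pattern += key[item]
--
--     # Prune pattern
--     patterns = [pattern[0:3], pattern[3:6], pattern[6:9]]
--     while "   " in patterns:
--         patterns.remove("   ")
--
--     removeable_column_indices = [i for i in range(3) if False not in [pattern[i] == " " for pattern in patterns]]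
--     removed = 0
--     for column in removeable_column_indices:
--         for i in range(len(patterns)):
--             list_pattern = list(patterns[i])
--             list_pattern.remove(list_pattern[column-removed])
--             patterns[i] = "".join(list_pattern)
--         removed += 1
--
--     return patterns, {value: letter for letter, value in key.items()}
-- ===== SOURCE B (Python) =====
-- def get_pattern_from_list(grid):
--     pattern = ""
--     key = {}
--     for item in grid[:9]:
--         if item == "minecraft:air":
--             pattern += " "
--         else:
--             if item not in key:
--                 key[item] = "ABCDEFGHI"[len(key)]
--             pattern += key[item]
--
--     rows = [r for r in (pattern[0:3], pattern[3:6], pattern[6:9]) if r != "   "]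
--     kept_columns = [c for c in range(3) if any(row[c] != " " for row in rows)]
--     rows = ["".join(row[c] for c in kept_columns) for row in rows]
--     return rows, {value: letter for letter, value in key.items()}
-- ===== Notes on version B (the rewrite author's own statement) =====
-- stated objective: simpler
-- what changed: The pruning phase is rewritten: instead of a destructive while-remove of blank rows followed by a stateful column-removal loop (running offset, list.remove of the first matching character), B filters out blank rows once and rebuilds each kept row from the column indices that are not all-space.
-- intended difference: On grids where column 2 is all-air, some row starts 'air, item' and some row has a non-air first cell, A's list.remove deletes the leading space of the 'air, item, air' row instead of its column-2 space and returns e.g. 'A ' (rows even of uneven width) where B returns the intended ' A' with column 2 dropped. — e.g. on get_pattern_from_list(["minecraft:air", "stone", "minecraft:air", "plank", "plank", "minecraft:air", "minecraft:air", "minecraft:air", "minec…): A returns (["A ", "BB"], [("A", "stone"), ("B", "plank")]), B returns ([" A", "BB"], [("A", "stone"), ("B", "plank")])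
import Mathlib
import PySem

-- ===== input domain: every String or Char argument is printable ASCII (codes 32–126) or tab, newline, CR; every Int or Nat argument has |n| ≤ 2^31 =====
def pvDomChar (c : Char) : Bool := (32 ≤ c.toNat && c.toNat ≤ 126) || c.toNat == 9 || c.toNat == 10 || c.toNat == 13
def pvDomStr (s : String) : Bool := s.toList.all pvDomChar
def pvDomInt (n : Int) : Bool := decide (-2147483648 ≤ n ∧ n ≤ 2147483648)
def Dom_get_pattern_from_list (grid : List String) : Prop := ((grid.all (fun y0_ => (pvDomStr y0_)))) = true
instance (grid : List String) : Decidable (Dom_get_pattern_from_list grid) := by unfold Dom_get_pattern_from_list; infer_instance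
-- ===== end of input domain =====

-- B rewrites the pruning phase (filter blank rows once, rebuild rows from the kept column
-- indices) instead of A's destructive while-remove plus offset-based column removal; on the
-- corner region D_ below A's list.remove deletes the wrong space and B returns the intended row.

-- ===== PORT A =====
-- The first loop (pattern/key construction) and the dict inversion are textually identical
-- in A and in B, so both ports share pvStep/pvBuild/pvInvert.
-- available_symbols = "ABCDEFGHI" as a char list.
def pvSymbols : List Char := ['A', 'B', 'C', 'D', 'E', 'F', 'G', 'H', 'I']

-- one iteration of `for item in grid[:9]: ...`; state = (pattern, key).
-- the two .getD never fire on inputs the loop reaches: len(key) ≤ 8 when indexing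
-- available_symbols, and key[item] is looked up right after item was ensured present.
def pvStep (st : List Char × PySem.Dict String Char) (item : String) :
    List Char × PySem.Dict String Char :=
  if item = "minecraft:air" then (st.1 ++ [' '], st.2)
  else
    let key := if st.2.contains item then st.2
               else st.2.insert item ((PySem.List.pyGet? pvSymbols (st.2.size : Int)).getD ' ')
    (st.1 ++ [key.getD item ' '], key)

def pvBuild (grid : List String) : List Char × PySem.Dict String Char :=
  (PySem.List.slice grid none (some 9)).foldl pvStep ([], PySem.Dict.empty)

-- {value: letter for letter, value in key.items()} (a dict comprehension builds a dict by insertion)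
def pvInvert (key : PySem.Dict String Char) : List (String × String) :=
  (key.items.foldl (fun d kv => d.insert (String.ofList [kv.2]) kv.1)
    (PySem.Dict.empty : PySem.Dict String String)).items

-- `while "   " in patterns: patterns.remove("   ")`; each iteration shortens the list by
-- one, so a fuel of the initial length bounds the loop exactly.
def pvWhileRemoveGo : Nat → List (List Char) → List (List Char)
  | 0, l => l
  | n + 1, l =>
    match PySem.List.remove? l [' ', ' ', ' '] with
    | some l' => pvWhileRemoveGo n l'
    | none => l

def pvWhileRemove (l : List (List Char)) : List (List Char) :=
  pvWhileRemoveGo l.length l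

def pvPruneA (pattern : List Char) : List String :=
  let patterns := [PySem.List.slice pattern (some 0) (some 3),
                   PySem.List.slice pattern (some 3) (some 6),
                   PySem.List.slice pattern (some 6) (some 9)]
  let patterns := pvWhileRemove patterns
  -- [i for i in range(3) if False not in [pattern[i] == " " for pattern in patterns]]
  -- (pattern[i] raises IndexError on a short row: Pre_ excludes grids shorter than 9)
  let removeable := (PySem.List.pyRange 0 3 1).filter
      (fun i => !((patterns.map (fun p => PySem.List.pyGet? p i == some ' ')).contains false))
  let res := removeable.foldl
      (fun (st : List (List Char) × Int) column =>
        let pats := (PySem.List.pyRange 0 (st.1.length : Int) 1).foldl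
          (fun pats i =>
            let lp := (PySem.List.pyGet? pats i).getD []
            let x := (PySem.List.pyGet? lp (column - st.2)).getD ' '  -- in range whenever A returns
            let lp := (PySem.List.remove? lp x).getD lp               -- x ∈ lp whenever A returns
            pats.set i.toNat lp)
          st.1
        (pats, st.2 + 1))
      (patterns, 0)
  res.1.map (fun r => String.ofList r)

def get_pattern_from_list (grid : List String) : List String × (List (String × String)) :=
  let bk := pvBuild grid
  (pvPruneA bk.1, pvInvert bk.2)

-- ===== PORT B =====
def pvPruneB (pattern : List Char) : List String :=
  let rows := [PySem.List.slice pattern (some 0) (some 3),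
               PySem.List.slice pattern (some 3) (some 6),
               PySem.List.slice pattern (some 6) (some 9)].filter
      (fun r => !(r == [' ', ' ', ' ']))
  -- [c for c in range(3) if any(row[c] != " " for row in rows)]
  let kept := (PySem.List.pyRange 0 3 1).filter
      (fun c => rows.any (fun row => !(PySem.List.pyGet? row c == some ' ')))
  rows.map (fun row => String.ofList (kept.map (fun c => (PySem.List.pyGet? row c).getD ' ')))

def get_pattern_from_list_alt (grid : List String) : List String × (List (String × String)) :=
  let bk := pvBuild grid
  (pvPruneB bk.1, pvInvert bk.2)

-- ===== PRECONDITION & SPEC =====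
-- A raises IndexError on every grid with fewer than 9 items (some produced row is shorter
-- than 3 and `pattern[i]` in the column scan goes out of range), so Pre_ is exactly len ≥ 9.
def Pre_get_pattern_from_list (grid : List String) : Prop := 9 ≤ grid.length
instance (grid : List String) : Decidable (Pre_get_pattern_from_list grid) := by
  unfold Pre_get_pattern_from_list; infer_instance

def pvWitness_get_pattern_from_list : List String :=
  ["minecraft:air", "a", "minecraft:air", "b", "b", "c", "minecraft:air", "a", "minecraft:air"]

-- is cell i of the (virtual 3x3) grid air?
def pvAir (grid : List String) (i : Nat) : Bool :=
  PySem.List.pyGet? grid (i : Int) == some "minecraft:air"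

-- On grids where column 2 is air in every row, some row is (air, item, ...) and some row is
-- (item, ...), A's list.remove deletes that row's leading space instead of its column-2 space
-- (returning e.g. "A " where the intended row, with column 2 dropped, is " A"); B returns the
-- intended value.
def D_get_pattern_from_list (grid : List String) : Prop :=
  ((pvAir grid 0 && !pvAir grid 1 || pvAir grid 3 && !pvAir grid 4 || pvAir grid 6 && !pvAir grid 7) &&
   (pvAir grid 2 && pvAir grid 5 && pvAir grid 8) &&
   (!pvAir grid 0 || !pvAir grid 3 || !pvAir grid 6)) = true
instance (grid : List String) : Decidable (D_get_pattern_from_list grid) := by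
  unfold D_get_pattern_from_list; infer_instance

def Spec_get_pattern_from_list (grid : List String) (out : List String × (List (String × String))) : Prop :=
  ¬ D_get_pattern_from_list grid → out = get_pattern_from_list_alt grid
instance (grid : List String) (out : List String × (List (String × String))) : Decidable (Spec_get_pattern_from_list grid out) := by
  unfold Spec_get_pattern_from_list; infer_instance

def pvDiffWitness_get_pattern_from_list : List String :=
  ["minecraft:air", "stone", "minecraft:air", "plank", "plank", "minecraft:air",
   "minecraft:air", "minecraft:air", "minecraft:air"]

def pvDiffWitnessOut_get_pattern_from_list :
    (List String × (List (String × String))) × (List String × (List (String × String))) :=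
  ((["A ", "BB"], [("A", "stone"), ("B", "plank")]),
   ([" A", "BB"], [("A", "stone"), ("B", "plank")]))

-- ===== CLAIM (what is proved, stated in full; the proofs are below) =====
def Claim_unchanged_get_pattern_from_list : Prop := ∀ (grid : List String), Dom_get_pattern_from_list grid → Pre_get_pattern_from_list grid → Spec_get_pattern_from_list grid (get_pattern_from_list grid)
def Claim_exact_get_pattern_from_list : Prop := ∀ (grid : List String), Dom_get_pattern_from_list grid → Pre_get_pattern_from_list grid → D_get_pattern_from_list grid → get_pattern_from_list grid ≠ get_pattern_from_list_alt grid
def Claim_changed_get_pattern_from_list : Prop := Dom_get_pattern_from_list (pvDiffWitness_get_pattern_from_list) ∧ Pre_get_pattern_from_list (pvDiffWitness_get_pattern_from_list) ∧ D_get_pattern_from_list (pvDiffWitness_get_pattern_from_list) ∧ get_pattern_from_list (pvDiffWitness_get_pattern_from_list) = pvDiffWitnessOut_get_pattern_from_list.1 ∧ get_pattern_from_list_alt (pvDiffWitness_get_pattern_from_list) = pvDiffWitnessOut_get_pattern_from_list.2 ∧ pvDiffWitnessOut_get_pattern_from_list.1 ≠ pvDiffWitnessOut_get_pattern_from_list.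2

-- ===== LEMMAS AND PROOFS =====

-- is a row of air-mask (a,b,c) kept (i.e. not blank)?
abbrev pvKeptRow (a b c : Bool) : Bool := !(a && b && c)

-- the same change region written over the 9-cell air mask in the shape the row-by-row
-- analysis below produces: some kept row is (air, item, air) while column 2 is air in every
-- kept row and column 0 is not air in some kept row.
abbrev pvDMask (m0 m1 m2 m3 m4 m5 m6 m7 m8 : Bool) : Bool :=
  ((pvKeptRow m0 m1 m2 && m0 && !m1 && m2) ||
   (pvKeptRow m3 m4 m5 && m3 && !m4 && m5) ||
   (pvKeptRow m6 m7 m8 && m6 && !m7 && m8)) &&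
  ((!(pvKeptRow m0 m1 m2) || m2) && (!(pvKeptRow m3 m4 m5) || m5) && (!(pvKeptRow m6 m7 m8) || m8)) &&
  ((pvKeptRow m0 m1 m2 && !m0) || (pvKeptRow m3 m4 m5 && !m3) || (pvKeptRow m6 m7 m8 && !m6))

-- pvDMask is the boolean inside D_get_pattern_from_list (512-case check)
theorem pvDMask_eq : ∀ m0 m1 m2 m3 m4 m5 m6 m7 m8 : Bool,
    pvDMask m0 m1 m2 m3 m4 m5 m6 m7 m8 =
      ((m0 && !m1 || m3 && !m4 || m6 && !m7) && (m2 && m5 && m8) && (!m0 || !m3 || !m6)) := by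
  decide

theorem pvFilterErase {α : Type} [BEq α] [LawfulBEq α] (p : α → Bool) (v : α) (hv : p v = false) :
    ∀ l : List α, (l.erase v).filter p = l.filter p := by
  intro l
  induction l with
  | nil => rfl
  | cons a l ih =>
    rw [List.erase_cons]
    by_cases h : a = v
    · subst h; simp [hv]
    · simp [h, List.filter_cons, ih]

theorem pvWhileRemoveGo_eq_filter :
    ∀ (n : Nat) (l : List (List Char)), l.length ≤ n →
      pvWhileRemoveGo n l = l.filter (fun r => !(r == [' ', ' ', ' '])) := by
  intro n
  induction n with
  | zero =>
    intro l hl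
    have h : l = [] := List.eq_nil_of_length_eq_zero (Nat.le_zero.mp hl)
    subst h; rfl
  | succ n ih =>
    intro l hl
    by_cases hm : [' ', ' ', ' '] ∈ l
    · have hlen : (l.erase [' ', ' ', ' ']).length ≤ n := by
        have := List.length_erase_of_mem hm
        omega
      simp only [pvWhileRemoveGo, PySem.List.remove?_eq_some_erase l _ hm, ih _ hlen]
      exact pvFilterErase _ _ (by simp) _
    · simp only [pvWhileRemoveGo, (PySem.List.remove?_eq_none_iff l _).mpr hm]
      rw [List.filter_eq_self.mpr]
      intro a ha
      simp only [Bool.not_eq_true', beq_eq_false_iff_ne, ne_eq]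
      intro h
      exact hm (h ▸ ha)

theorem pvWhileRemove_eq_filter (l : List (List Char)) :
    pvWhileRemove l = l.filter (fun r => !(r == [' ', ' ', ' '])) :=
  pvWhileRemoveGo_eq_filter l.length l le_rfl

-- the inner `for i in range(len(patterns))` loop, which replaces each entry by f of itself, is a map
theorem pvInnerGen (f : List Char → List Char) :
    ∀ (rest done : List (List Char)),
      (PySem.List.pyRange (done.length : Int) ((done.length : Int) + (rest.length : Int)) 1).foldl
        (fun ps i => ps.set i.toNat (f ((PySem.List.pyGet? ps i).getD []))) (done ++ rest)
      = done ++ rest.map f := by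
  intro rest
  induction rest with
  | nil =>
    intro done
    rw [PySem.List.pyRange_one_eq_nil (by simp)]
    simp
  | cons r rest ih =>
    intro done
    rw [PySem.List.pyRange_one_cons (by push_cast [List.length_cons]; omega)]
    simp only [List.foldl_cons]
    rw [PySem.List.pyGet?_append_length]
    simp only [Option.getD_some]
    have hset : (done ++ r :: rest).set ((done.length : Int)).toNat (f r) = (done ++ [f r]) ++ rest := by
      rw [List.set_append]
      simp
    rw [hset]
    have h2 := ih (done ++ [f r])
    have e : ((done ++ [f r]).length : Int) = (done.length : Int) + 1 := by simp
    rw [e] at h2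
    have e2 : (done.length : Int) + 1 + (rest.length : Int) = (done.length : Int) + ((r :: rest).length : Int) := by
      push_cast [List.length_cons]; ring
    rw [e2] at h2
    simp only [List.map_cons]
    simpa [List.append_assoc] using h2

theorem pvInner0 (f : List Char → List Char) (pats : List (List Char)) :
    (PySem.List.pyRange 0 (pats.length : Int) 1).foldl
      (fun ps i => ps.set i.toNat (f ((PySem.List.pyGet? ps i).getD []))) pats
    = pats.map f := by
  have := pvInnerGen f pats []
  simpa using this

-- per-row effect of A's column-removal loop
def pvRowProc (cols : List Int) (rem : Int) (lp : List Char) : List Char :=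
  match cols with
  | [] => lp
  | c :: cs =>
      pvRowProc cs (rem + 1)
        ((PySem.List.remove? lp ((PySem.List.pyGet? lp (c - rem)).getD ' ')).getD lp)

theorem pvOuter (cols : List Int) :
    ∀ (K : List (List Char)) (j : Int),
      (cols.foldl
        (fun (st : List (List Char) × Int) column =>
          ((PySem.List.pyRange 0 (st.1.length : Int) 1).foldl
            (fun pats i =>
              pats.set i.toNat
                ((PySem.List.remove? ((PySem.List.pyGet? pats i).getD [])
                      ((PySem.List.pyGet? ((PySem.List.pyGet? pats i).getD []) (column - st.2)).getD ' ')).getD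
                  ((PySem.List.pyGet? pats i).getD [])))
            st.1, st.2 + 1))
        (K, j)).1
      = K.map (pvRowProc cols j) := by
  induction cols with
  | nil => intro K j; simp [pvRowProc]
  | cons c cs ih =>
    intro K j
    simp only [List.foldl_cons]
    rw [pvInner0 (fun lp => (PySem.List.remove? lp ((PySem.List.pyGet? lp (c - j)).getD ' ')).getD lp) K]
    rw [ih _ (j + 1)]
    rw [List.map_map]
    rfl

def pvRows (p : List Char) : List (List Char) :=
  [PySem.List.slice p (some 0) (some 3), PySem.List.slice p (some 3) (some 6),
   PySem.List.slice p (some 6) (some 9)]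

def pvKeptRows (p : List Char) : List (List Char) :=
  (pvRows p).filter (fun r => !(r == [' ', ' ', ' ']))

def pvColsA (p : List Char) : List Int :=
  (PySem.List.pyRange 0 3 1).filter
    (fun i => !(((pvKeptRows p).map (fun q => PySem.List.pyGet? q i == some ' ')).contains false))

def pvColsB (p : List Char) : List Int :=
  (PySem.List.pyRange 0 3 1).filter
    (fun c => (pvKeptRows p).any (fun row => !(PySem.List.pyGet? row c == some ' ')))

theorem pvA_eq (p : List Char) :
    pvPruneA p = (pvKeptRows p).map (fun lp => String.ofList (pvRowProc (pvColsA p) 0 lp)) := by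
  unfold pvPruneA
  dsimp only
  rw [pvWhileRemove_eq_filter]
  rw [pvOuter]
  rw [List.map_map]
  rfl

theorem pvB_eq (p : List Char) :
    pvPruneB p = (pvKeptRows p).map
      (fun row => String.ofList ((pvColsB p).map (fun c => (PySem.List.pyGet? row c).getD ' '))) := rfl

theorem pvR3 : PySem.List.pyRange 0 3 1 = [0, 1, 2] := by decide

theorem pvNotContainsFalse (l : List (List Char)) (f : List Char → Bool) :
    (!((l.map f).contains false)) = l.all f := by
  induction l with
  | nil => rfl
  | cons a l ih => by_cases h : f a <;> simp_all

-- the space-at-column-i-in-every-kept-row test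
def pvSp (p : List Char) (i : Int) : Bool :=
  (pvKeptRows p).all (fun q => PySem.List.pyGet? q i == some ' ')

theorem pvColsA_eq (p : List Char) : pvColsA p = [0, 1, 2].filter (pvSp p) := by
  rw [pvColsA, pvR3]
  congr 1
  funext i
  rw [pvNotContainsFalse]
  rfl

theorem pvColsB_eq (p : List Char) : pvColsB p = [0, 1, 2].filter (fun i => !(pvSp p i)) := by
  rw [pvColsB, pvR3]
  congr 1
  funext i
  rw [pvSp, ← List.not_all_eq_any_not]

-- per-row effect of the column-removal loop for each concrete set of removable columns
theorem pvRow_nil (r : List Char) : pvRowProc [] 0 r = r := rfl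

theorem pvRow_0 (a b c : Char) (ha : a = ' ') : pvRowProc [0] 0 [a, b, c] = [b, c] := by
  subst ha
  simp [pvRowProc, PySem.List.remove?, PySem.List.pyGet?, PySem.List.pyIdx?,
    List.idxOf?, List.findIdx?, List.findIdx?.go]

theorem pvRow_1 (a b c : Char) (hb : b = ' ') : pvRowProc [1] 0 [a, b, c] = [a, c] := by
  subst hb
  by_cases ha : a = ' ' <;>
    simp_all [pvRowProc, PySem.List.remove?, PySem.List.pyGet?, PySem.List.pyIdx?,
      List.idxOf?, List.findIdx?, List.findIdx?.go]

theorem pvRow_2 (a b c : Char) (hc : c = ' ') (hno : ¬(a = ' ' ∧ ¬b = ' ')) :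
    pvRowProc [2] 0 [a, b, c] = [a, b] := by
  subst hc
  by_cases ha : a = ' ' <;> by_cases hb : b = ' ' <;>
    simp_all [pvRowProc, PySem.List.remove?, PySem.List.pyGet?, PySem.List.pyIdx?,
      List.idxOf?, List.findIdx?, List.findIdx?.go]

theorem pvRow_01 (a b c : Char) (ha : a = ' ') (hb : b = ' ') :
    pvRowProc [0, 1] 0 [a, b, c] = [c] := by
  subst ha; subst hb
  simp [pvRowProc, PySem.List.remove?, PySem.List.pyGet?, PySem.List.pyIdx?,
    List.idxOf?, List.findIdx?, List.findIdx?.go]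

theorem pvRow_02 (a b c : Char) (ha : a = ' ') (hc : c = ' ') :
    pvRowProc [0, 2] 0 [a, b, c] = [b] := by
  subst ha; subst hc
  by_cases hb : b = ' ' <;>
    simp_all [pvRowProc, PySem.List.remove?, PySem.List.pyGet?, PySem.List.pyIdx?,
      List.idxOf?, List.findIdx?, List.findIdx?.go]

theorem pvRow_12 (a b c : Char) (hb : b = ' ') (hc : c = ' ') :
    pvRowProc [1, 2] 0 [a, b, c] = [a] := by
  subst hb; subst hc
  by_cases ha : a = ' ' <;>
    simp_all [pvRowProc, PySem.List.remove?, PySem.List.pyGet?, PySem.List.pyIdx?,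
      List.idxOf?, List.findIdx?, List.findIdx?.go]

theorem pvMask_true0 (c0 c1 c2 c3 c4 c5 c6 c7 c8 : Char)
    (hA : c0 = ' ') (hB : ¬ c1 = ' ') (hC : c2 = ' ')
    (hcol2 : ∀ r' ∈ pvKeptRows [c0, c1, c2, c3, c4, c5, c6, c7, c8],
        (PySem.List.pyGet? r' 2 == some ' ') = true)
    (hex : ∃ x, ∃ _ : x ∈ pvKeptRows [c0, c1, c2, c3, c4, c5, c6, c7, c8],
        ¬(PySem.List.pyGet? x 0 == some ' ') = true) :
    pvDMask (c0 == ' ') (c1 == ' ') (c2 == ' ') (c3 == ' ') (c4 == ' ') (c5 == ' ')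
      (c6 == ' ') (c7 == ' ') (c8 == ' ') = true := by
  have hKR : pvKeptRows [c0, c1, c2, c3, c4, c5, c6, c7, c8] =
      [[c0, c1, c2], [c3, c4, c5], [c6, c7, c8]].filter (fun r => !(r == [' ', ' ', ' '])) := rfl
  have h2_0 : (!(pvKeptRow (c0 == ' ') (c1 == ' ') (c2 == ' ')) || (c2 == ' ')) = true := by
    by_cases hbl : ((c0 == ' ') && ((c1 == ' ') && (c2 == ' '))) = true
    · simp [pvKeptRow, Bool.and_assoc, hbl]
    · have hmem : [c0, c1, c2] ∈ pvKeptRows [c0, c1, c2, c3, c4, c5, c6, c7, c8] := by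
        rw [hKR]
        refine List.mem_filter.mpr ⟨by simp, ?_⟩
        simp only [Bool.and_eq_true, beq_iff_eq, not_and] at hbl
        simp
        tauto
      have := hcol2 _ hmem
      simp [PySem.List.pyGet?, PySem.List.pyIdx?] at this
      simp [this]
  have h2_1 : (!(pvKeptRow (c3 == ' ') (c4 == ' ') (c5 == ' ')) || (c5 == ' ')) = true := by
    by_cases hbl : ((c3 == ' ') && ((c4 == ' ') && (c5 == ' '))) = true
    · simp [pvKeptRow, Bool.and_assoc, hbl]
    · have hmem : [c3, c4, c5] ∈ pvKeptRows [c0, c1, c2, c3, c4, c5, c6, c7, c8] := by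
        rw [hKR]
        refine List.mem_filter.mpr ⟨by simp, ?_⟩
        simp only [Bool.and_eq_true, beq_iff_eq, not_and] at hbl
        simp
        tauto
      have := hcol2 _ hmem
      simp [PySem.List.pyGet?, PySem.List.pyIdx?] at this
      simp [this]
  have h2_2 : (!(pvKeptRow (c6 == ' ') (c7 == ' ') (c8 == ' ')) || (c8 == ' ')) = true := by
    by_cases hbl : ((c6 == ' ') && ((c7 == ' ') && (c8 == ' '))) = true
    · simp [pvKeptRow, Bool.and_assoc, hbl]
    · have hmem : [c6, c7, c8] ∈ pvKeptRows [c0, c1, c2, c3, c4, c5, c6, c7, c8] := by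
        rw [hKR]
        refine List.mem_filter.mpr ⟨by simp, ?_⟩
        simp only [Bool.and_eq_true, beq_iff_eq, not_and] at hbl
        simp
        tauto
      have := hcol2 _ hmem
      simp [PySem.List.pyGet?, PySem.List.pyIdx?] at this
      simp [this]
  obtain ⟨x, hx, hxf⟩ := hex
  have hxm := List.mem_filter.mp (hKR ▸ hx)
  have hxmem := hxm.1
  simp only [List.mem_cons, List.not_mem_nil, or_false] at hxmem
  have hconj3 : ((pvKeptRow (c0 == ' ') (c1 == ' ') (c2 == ' ') && !(c0 == ' ')) ||
      (pvKeptRow (c3 == ' ') (c4 == ' ') (c5 == ' ') && !(c3 == ' ')) ||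
      (pvKeptRow (c6 == ' ') (c7 == ' ') (c8 == ' ') && !(c6 == ' '))) = true := by
    rcases hxmem with rfl | rfl | rfl <;>
      · have hnb := hxm.2
        simp only [PySem.List.pyGet?, PySem.List.pyIdx?] at hxf
        norm_num at hxf
        simp_all [pvKeptRow]
  simp_all [pvKeptRow]

theorem pvMask_true1 (c0 c1 c2 c3 c4 c5 c6 c7 c8 : Char)
    (hA : c3 = ' ') (hB : ¬ c4 = ' ') (hC : c5 = ' ')
    (hcol2 : ∀ r' ∈ pvKeptRows [c0, c1, c2, c3, c4, c5, c6, c7, c8],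
        (PySem.List.pyGet? r' 2 == some ' ') = true)
    (hex : ∃ x, ∃ _ : x ∈ pvKeptRows [c0, c1, c2, c3, c4, c5, c6, c7, c8],
        ¬(PySem.List.pyGet? x 0 == some ' ') = true) :
    pvDMask (c0 == ' ') (c1 == ' ') (c2 == ' ') (c3 == ' ') (c4 == ' ') (c5 == ' ')
      (c6 == ' ') (c7 == ' ') (c8 == ' ') = true := by
  have hKR : pvKeptRows [c0, c1, c2, c3, c4, c5, c6, c7, c8] =
      [[c0, c1, c2], [c3, c4, c5], [c6, c7, c8]].filter (fun r => !(r == [' ', ' ', ' '])) := rfl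
  have h2_0 : (!(pvKeptRow (c0 == ' ') (c1 == ' ') (c2 == ' ')) || (c2 == ' ')) = true := by
    by_cases hbl : ((c0 == ' ') && ((c1 == ' ') && (c2 == ' '))) = true
    · simp [pvKeptRow, Bool.and_assoc, hbl]
    · have hmem : [c0, c1, c2] ∈ pvKeptRows [c0, c1, c2, c3, c4, c5, c6, c7, c8] := by
        rw [hKR]
        refine List.mem_filter.mpr ⟨by simp, ?_⟩
        simp only [Bool.and_eq_true, beq_iff_eq, not_and] at hbl
        simp
        tauto
      have := hcol2 _ hmem
      simp [PySem.List.pyGet?, PySem.List.pyIdx?] at this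
      simp [this]
  have h2_1 : (!(pvKeptRow (c3 == ' ') (c4 == ' ') (c5 == ' ')) || (c5 == ' ')) = true := by
    by_cases hbl : ((c3 == ' ') && ((c4 == ' ') && (c5 == ' '))) = true
    · simp [pvKeptRow, Bool.and_assoc, hbl]
    · have hmem : [c3, c4, c5] ∈ pvKeptRows [c0, c1, c2, c3, c4, c5, c6, c7, c8] := by
        rw [hKR]
        refine List.mem_filter.mpr ⟨by simp, ?_⟩
        simp only [Bool.and_eq_true, beq_iff_eq, not_and] at hbl
        simp
        tauto
      have := hcol2 _ hmem
      simp [PySem.List.pyGet?, PySem.List.pyIdx?] at this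
      simp [this]
  have h2_2 : (!(pvKeptRow (c6 == ' ') (c7 == ' ') (c8 == ' ')) || (c8 == ' ')) = true := by
    by_cases hbl : ((c6 == ' ') && ((c7 == ' ') && (c8 == ' '))) = true
    · simp [pvKeptRow, Bool.and_assoc, hbl]
    · have hmem : [c6, c7, c8] ∈ pvKeptRows [c0, c1, c2, c3, c4, c5, c6, c7, c8] := by
        rw [hKR]
        refine List.mem_filter.mpr ⟨by simp, ?_⟩
        simp only [Bool.and_eq_true, beq_iff_eq, not_and] at hbl
        simp
        tauto
      have := hcol2 _ hmem
      simp [PySem.List.pyGet?, PySem.List.pyIdx?] at this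
      simp [this]
  obtain ⟨x, hx, hxf⟩ := hex
  have hxm := List.mem_filter.mp (hKR ▸ hx)
  have hxmem := hxm.1
  simp only [List.mem_cons, List.not_mem_nil, or_false] at hxmem
  have hconj3 : ((pvKeptRow (c0 == ' ') (c1 == ' ') (c2 == ' ') && !(c0 == ' ')) ||
      (pvKeptRow (c3 == ' ') (c4 == ' ') (c5 == ' ') && !(c3 == ' ')) ||
      (pvKeptRow (c6 == ' ') (c7 == ' ') (c8 == ' ') && !(c6 == ' '))) = true := by
    rcases hxmem with rfl | rfl | rfl <;>
      · have hnb := hxm.2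
        simp only [PySem.List.pyGet?, PySem.List.pyIdx?] at hxf
        norm_num at hxf
        simp_all [pvKeptRow]
  simp_all [pvKeptRow]

theorem pvMask_true2 (c0 c1 c2 c3 c4 c5 c6 c7 c8 : Char)
    (hA : c6 = ' ') (hB : ¬ c7 = ' ') (hC : c8 = ' ')
    (hcol2 : ∀ r' ∈ pvKeptRows [c0, c1, c2, c3, c4, c5, c6, c7, c8],
        (PySem.List.pyGet? r' 2 == some ' ') = true)
    (hex : ∃ x, ∃ _ : x ∈ pvKeptRows [c0, c1, c2, c3, c4, c5, c6, c7, c8],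
        ¬(PySem.List.pyGet? x 0 == some ' ') = true) :
    pvDMask (c0 == ' ') (c1 == ' ') (c2 == ' ') (c3 == ' ') (c4 == ' ') (c5 == ' ')
      (c6 == ' ') (c7 == ' ') (c8 == ' ') = true := by
  have hKR : pvKeptRows [c0, c1, c2, c3, c4, c5, c6, c7, c8] =
      [[c0, c1, c2], [c3, c4, c5], [c6, c7, c8]].filter (fun r => !(r == [' ', ' ', ' '])) := rfl
  have h2_0 : (!(pvKeptRow (c0 == ' ') (c1 == ' ') (c2 == ' ')) || (c2 == ' ')) = true := by
    by_cases hbl : ((c0 == ' ') && ((c1 == ' ') && (c2 == ' '))) = true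
    · simp [pvKeptRow, Bool.and_assoc, hbl]
    · have hmem : [c0, c1, c2] ∈ pvKeptRows [c0, c1, c2, c3, c4, c5, c6, c7, c8] := by
        rw [hKR]
        refine List.mem_filter.mpr ⟨by simp, ?_⟩
        simp only [Bool.and_eq_true, beq_iff_eq, not_and] at hbl
        simp
        tauto
      have := hcol2 _ hmem
      simp [PySem.List.pyGet?, PySem.List.pyIdx?] at this
      simp [this]
  have h2_1 : (!(pvKeptRow (c3 == ' ') (c4 == ' ') (c5 == ' ')) || (c5 == ' ')) = true := by
    by_cases hbl : ((c3 == ' ') && ((c4 == ' ') && (c5 == ' '))) = true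
    · simp [pvKeptRow, Bool.and_assoc, hbl]
    · have hmem : [c3, c4, c5] ∈ pvKeptRows [c0, c1, c2, c3, c4, c5, c6, c7, c8] := by
        rw [hKR]
        refine List.mem_filter.mpr ⟨by simp, ?_⟩
        simp only [Bool.and_eq_true, beq_iff_eq, not_and] at hbl
        simp
        tauto
      have := hcol2 _ hmem
      simp [PySem.List.pyGet?, PySem.List.pyIdx?] at this
      simp [this]
  have h2_2 : (!(pvKeptRow (c6 == ' ') (c7 == ' ') (c8 == ' ')) || (c8 == ' ')) = true := by
    by_cases hbl : ((c6 == ' ') && ((c7 == ' ') && (c8 == ' '))) = true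
    · simp [pvKeptRow, Bool.and_assoc, hbl]
    · have hmem : [c6, c7, c8] ∈ pvKeptRows [c0, c1, c2, c3, c4, c5, c6, c7, c8] := by
        rw [hKR]
        refine List.mem_filter.mpr ⟨by simp, ?_⟩
        simp only [Bool.and_eq_true, beq_iff_eq, not_and] at hbl
        simp
        tauto
      have := hcol2 _ hmem
      simp [PySem.List.pyGet?, PySem.List.pyIdx?] at this
      simp [this]
  obtain ⟨x, hx, hxf⟩ := hex
  have hxm := List.mem_filter.mp (hKR ▸ hx)
  have hxmem := hxm.1
  simp only [List.mem_cons, List.not_mem_nil, or_false] at hxmem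
  have hconj3 : ((pvKeptRow (c0 == ' ') (c1 == ' ') (c2 == ' ') && !(c0 == ' ')) ||
      (pvKeptRow (c3 == ' ') (c4 == ' ') (c5 == ' ') && !(c3 == ' ')) ||
      (pvKeptRow (c6 == ' ') (c7 == ' ') (c8 == ' ') && !(c6 == ' '))) = true := by
    rcases hxmem with rfl | rfl | rfl <;>
      · have hnb := hxm.2
        simp only [PySem.List.pyGet?, PySem.List.pyIdx?] at hxf
        norm_num at hxf
        simp_all [pvKeptRow]
  simp_all [pvKeptRow]

set_option maxHeartbeats 1000000 in
theorem pvPrune_eq (c0 c1 c2 c3 c4 c5 c6 c7 c8 : Char)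
    (hmask : pvDMask (c0 == ' ') (c1 == ' ') (c2 == ' ') (c3 == ' ') (c4 == ' ') (c5 == ' ')
      (c6 == ' ') (c7 == ' ') (c8 == ' ') = false) :
    pvPruneA [c0, c1, c2, c3, c4, c5, c6, c7, c8] = pvPruneB [c0, c1, c2, c3, c4, c5, c6, c7, c8] := by
  have hKR : pvKeptRows [c0, c1, c2, c3, c4, c5, c6, c7, c8] =
      [[c0, c1, c2], [c3, c4, c5], [c6, c7, c8]].filter (fun r => !(r == [' ', ' ', ' '])) := rfl
  rw [pvA_eq, pvB_eq, pvColsA_eq, pvColsB_eq]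
  have hsp : ∀ (i : Int), pvSp [c0, c1, c2, c3, c4, c5, c6, c7, c8] i = true →
      ∀ r ∈ pvKeptRows [c0, c1, c2, c3, c4, c5, c6, c7, c8],
        (PySem.List.pyGet? r i == some ' ') = true :=
    fun i hi r hr => List.all_eq_true.mp hi r hr
  by_cases h0 : pvSp [c0, c1, c2, c3, c4, c5, c6, c7, c8] 0 <;>
    by_cases h1 : pvSp [c0, c1, c2, c3, c4, c5, c6, c7, c8] 1 <;>
    by_cases h2 : pvSp [c0, c1, c2, c3, c4, c5, c6, c7, c8] 2 <;>
    simp only [h0, h1, h2, List.filter_cons, List.filter_nil, Bool.not_true, Bool.not_false,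
      if_true, if_false, Bool.false_eq_true] <;>
    [skip; skip; skip; skip; skip; skip; skip; skip] <;>
    apply List.map_congr_left <;> intro r hr
  · -- sp = (True, True, True)
    exfalso
    have hnb := (List.mem_filter.mp (hKR ▸ hr)).2
    have hmem := (List.mem_filter.mp (hKR ▸ hr)).1
    have ha := hsp 0 h0 r hr
    have hb := hsp 1 h1 r hr
    have hc := hsp 2 h2 r hr
    simp only [List.mem_cons, List.not_mem_nil, or_false] at hmem
    rcases hmem with rfl | rfl | rfl <;> simp_all [PySem.List.pyGet?, PySem.List.pyIdx?]
  · -- sp = (True, True, False)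
    have hmem := (List.mem_filter.mp (hKR ▸ hr)).1
    simp only [List.mem_cons, List.not_mem_nil, or_false] at hmem
    apply congrArg
    rcases hmem with rfl | rfl | rfl
    · have hs0 : c0 = ' ' := by simpa [PySem.List.pyGet?, PySem.List.pyIdx?] using hsp 0 h0 _ hr
      have hs1 : c1 = ' ' := by simpa [PySem.List.pyGet?, PySem.List.pyIdx?] using hsp 1 h1 _ hr
      rw [pvRow_01 c0 c1 c2 hs0 hs1]
      simp [PySem.List.pyGet?, PySem.List.pyIdx?]
    · have hs0 : c3 = ' ' := by simpa [PySem.List.pyGet?, PySem.List.pyIdx?] using hsp 0 h0 _ hr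
      have hs1 : c4 = ' ' := by simpa [PySem.List.pyGet?, PySem.List.pyIdx?] using hsp 1 h1 _ hr
      rw [pvRow_01 c3 c4 c5 hs0 hs1]
      simp [PySem.List.pyGet?, PySem.List.pyIdx?]
    · have hs0 : c6 = ' ' := by simpa [PySem.List.pyGet?, PySem.List.pyIdx?] using hsp 0 h0 _ hr
      have hs1 : c7 = ' ' := by simpa [PySem.List.pyGet?, PySem.List.pyIdx?] using hsp 1 h1 _ hr
      rw [pvRow_01 c6 c7 c8 hs0 hs1]
      simp [PySem.List.pyGet?, PySem.List.pyIdx?]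
  · -- sp = (True, False, True)
    have hmem := (List.mem_filter.mp (hKR ▸ hr)).1
    simp only [List.mem_cons, List.not_mem_nil, or_false] at hmem
    apply congrArg
    rcases hmem with rfl | rfl | rfl
    · have hs0 : c0 = ' ' := by simpa [PySem.List.pyGet?, PySem.List.pyIdx?] using hsp 0 h0 _ hr
      have hs2 : c2 = ' ' := by simpa [PySem.List.pyGet?, PySem.List.pyIdx?] using hsp 2 h2 _ hr
      rw [pvRow_02 c0 c1 c2 hs0 hs2]
      simp [PySem.List.pyGet?, PySem.List.pyIdx?]
    · have hs0 : c3 = ' ' := by simpa [PySem.List.pyGet?, PySem.List.pyIdx?] using hsp 0 h0 _ hr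
      have hs2 : c5 = ' ' := by simpa [PySem.List.pyGet?, PySem.List.pyIdx?] using hsp 2 h2 _ hr
      rw [pvRow_02 c3 c4 c5 hs0 hs2]
      simp [PySem.List.pyGet?, PySem.List.pyIdx?]
    · have hs0 : c6 = ' ' := by simpa [PySem.List.pyGet?, PySem.List.pyIdx?] using hsp 0 h0 _ hr
      have hs2 : c8 = ' ' := by simpa [PySem.List.pyGet?, PySem.List.pyIdx?] using hsp 2 h2 _ hr
      rw [pvRow_02 c6 c7 c8 hs0 hs2]
      simp [PySem.List.pyGet?, PySem.List.pyIdx?]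
  · -- sp = (True, False, False)
    have hmem := (List.mem_filter.mp (hKR ▸ hr)).1
    simp only [List.mem_cons, List.not_mem_nil, or_false] at hmem
    apply congrArg
    rcases hmem with rfl | rfl | rfl
    · have hs0 : c0 = ' ' := by simpa [PySem.List.pyGet?, PySem.List.pyIdx?] using hsp 0 h0 _ hr
      rw [pvRow_0 c0 c1 c2 hs0]
      simp [PySem.List.pyGet?, PySem.List.pyIdx?]
    · have hs0 : c3 = ' ' := by simpa [PySem.List.pyGet?, PySem.List.pyIdx?] using hsp 0 h0 _ hr
      rw [pvRow_0 c3 c4 c5 hs0]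
      simp [PySem.List.pyGet?, PySem.List.pyIdx?]
    · have hs0 : c6 = ' ' := by simpa [PySem.List.pyGet?, PySem.List.pyIdx?] using hsp 0 h0 _ hr
      rw [pvRow_0 c6 c7 c8 hs0]
      simp [PySem.List.pyGet?, PySem.List.pyIdx?]
  · -- sp = (False, True, True)
    have hmem := (List.mem_filter.mp (hKR ▸ hr)).1
    simp only [List.mem_cons, List.not_mem_nil, or_false] at hmem
    apply congrArg
    rcases hmem with rfl | rfl | rfl
    · have hs1 : c1 = ' ' := by simpa [PySem.List.pyGet?, PySem.List.pyIdx?] using hsp 1 h1 _ hr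
      have hs2 : c2 = ' ' := by simpa [PySem.List.pyGet?, PySem.List.pyIdx?] using hsp 2 h2 _ hr
      rw [pvRow_12 c0 c1 c2 hs1 hs2]
      simp [PySem.List.pyGet?, PySem.List.pyIdx?]
    · have hs1 : c4 = ' ' := by simpa [PySem.List.pyGet?, PySem.List.pyIdx?] using hsp 1 h1 _ hr
      have hs2 : c5 = ' ' := by simpa [PySem.List.pyGet?, PySem.List.pyIdx?] using hsp 2 h2 _ hr
      rw [pvRow_12 c3 c4 c5 hs1 hs2]
      simp [PySem.List.pyGet?, PySem.List.pyIdx?]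
    · have hs1 : c7 = ' ' := by simpa [PySem.List.pyGet?, PySem.List.pyIdx?] using hsp 1 h1 _ hr
      have hs2 : c8 = ' ' := by simpa [PySem.List.pyGet?, PySem.List.pyIdx?] using hsp 2 h2 _ hr
      rw [pvRow_12 c6 c7 c8 hs1 hs2]
      simp [PySem.List.pyGet?, PySem.List.pyIdx?]
  · -- sp = (False, True, False)
    have hmem := (List.mem_filter.mp (hKR ▸ hr)).1
    simp only [List.mem_cons, List.not_mem_nil, or_false] at hmem
    apply congrArg
    rcases hmem with rfl | rfl | rfl
    · have hs1 : c1 = ' ' := by simpa [PySem.List.pyGet?, PySem.List.pyIdx?] using hsp 1 h1 _ hr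
      rw [pvRow_1 c0 c1 c2 hs1]
      simp [PySem.List.pyGet?, PySem.List.pyIdx?]
    · have hs1 : c4 = ' ' := by simpa [PySem.List.pyGet?, PySem.List.pyIdx?] using hsp 1 h1 _ hr
      rw [pvRow_1 c3 c4 c5 hs1]
      simp [PySem.List.pyGet?, PySem.List.pyIdx?]
    · have hs1 : c7 = ' ' := by simpa [PySem.List.pyGet?, PySem.List.pyIdx?] using hsp 1 h1 _ hr
      rw [pvRow_1 c6 c7 c8 hs1]
      simp [PySem.List.pyGet?, PySem.List.pyIdx?]
  · -- sp = (False, False, True)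
    have hmem := (List.mem_filter.mp (hKR ▸ hr)).1
    simp only [List.mem_cons, List.not_mem_nil, or_false] at hmem
    apply congrArg
    have hnb := (List.mem_filter.mp (hKR ▸ hr)).2
    have hcol2 : ∀ r' ∈ pvKeptRows [c0, c1, c2, c3, c4, c5, c6, c7, c8],
        (PySem.List.pyGet? r' 2 == some ' ') = true := fun r' hr' => hsp 2 h2 r' hr'
    simp only [pvSp, List.all_eq_true, not_forall] at h0
    rcases hmem with rfl | rfl | rfl
    · have hs2 : c2 = ' ' := by simpa [PySem.List.pyGet?, PySem.List.pyIdx?] using hsp 2 h2 _ hr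
      have hno0 : ¬(c0 = ' ' ∧ ¬c1 = ' ') := by
        rintro ⟨hA, hB⟩
        exact absurd (pvMask_true0 c0 c1 c2 c3 c4 c5 c6 c7 c8 hA hB hs2 hcol2 h0) (by simpa using hmask)
      rw [pvRow_2 c0 c1 c2 hs2 hno0]
      simp [PySem.List.pyGet?, PySem.List.pyIdx?]
    · have hs2 : c5 = ' ' := by simpa [PySem.List.pyGet?, PySem.List.pyIdx?] using hsp 2 h2 _ hr
      have hno1 : ¬(c3 = ' ' ∧ ¬c4 = ' ') := by
        rintro ⟨hA, hB⟩
        exact absurd (pvMask_true1 c0 c1 c2 c3 c4 c5 c6 c7 c8 hA hB hs2 hcol2 h0) (by simpa using hmask)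
      rw [pvRow_2 c3 c4 c5 hs2 hno1]
      simp [PySem.List.pyGet?, PySem.List.pyIdx?]
    · have hs2 : c8 = ' ' := by simpa [PySem.List.pyGet?, PySem.List.pyIdx?] using hsp 2 h2 _ hr
      have hno2 : ¬(c6 = ' ' ∧ ¬c7 = ' ') := by
        rintro ⟨hA, hB⟩
        exact absurd (pvMask_true2 c0 c1 c2 c3 c4 c5 c6 c7 c8 hA hB hs2 hcol2 h0) (by simpa using hmask)
      rw [pvRow_2 c6 c7 c8 hs2 hno2]
      simp [PySem.List.pyGet?, PySem.List.pyIdx?]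
  · -- sp = (False, False, False)
    have hmem := (List.mem_filter.mp (hKR ▸ hr)).1
    simp only [List.mem_cons, List.not_mem_nil, or_false] at hmem
    apply congrArg
    rcases hmem with rfl | rfl | rfl <;>
      · rw [pvRow_nil]
        simp [PySem.List.pyGet?, PySem.List.pyIdx?]

theorem pvSym_ne (n : Nat) (h : n ≤ 8) :
    (PySem.List.pyGet? pvSymbols (n : Int)).getD ' ' ≠ ' ' := by
  interval_cases n <;> decide

theorem pvGetD_ne_space (d : PySem.Dict String Char) (item : String)
    (hk : ∀ v ∈ d.values, v ≠ ' ') (hc : d.contains item = true) : d.getD item ' ' ≠ ' ' := by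
  have hs : (d.get? item).isSome := by rw [← PySem.Dict.contains_eq_isSome_get?]; exact hc
  obtain ⟨v, hv⟩ := Option.isSome_iff_exists.mp hs
  rw [PySem.Dict.getD_eq_get?_getD, hv, Option.getD_some]
  exact hk v (List.mem_map.mpr ⟨(item, v), PySem.Dict.mem_items_of_get?_eq_some _ hv, rfl⟩)

theorem pvBuildLoop :
    ∀ (l : List String) (pat : List Char) (key : PySem.Dict String Char),
      (∀ v ∈ key.values, v ≠ ' ') → key.size + l.length ≤ 9 →
      ∃ ext : List Char,
        (l.foldl pvStep (pat, key)).1 = pat ++ ext ∧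
        ext.length = l.length ∧
        (∀ i, i < l.length → ((ext.getD i ' ' = ' ') ↔ l.getD i "" = "minecraft:air")) := by
  intro l
  induction l with
  | nil => intro pat key hk hsz; exact ⟨[], by simp, rfl, fun i hi => absurd hi (by simp)⟩
  | cons item l ih =>
    intro pat key hk hsz
    by_cases hair : item = "minecraft:air"
    · subst hair
      obtain ⟨ext, he, hlen, hiff⟩ := ih (pat ++ [' ']) key hk (by simp at hsz ⊢; omega)
      refine ⟨' ' :: ext, ?_, by simp [hlen], ?_⟩
      · simpa [pvStep, List.append_assoc] using he
      · intro i hi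
        cases i with
        | zero => simp
        | succ j => simpa using hiff j (by simpa using Nat.lt_of_succ_lt_succ hi)
    · have hstep : pvStep (pat, key) item =
          (pat ++ [(if key.contains item then key
            else key.insert item ((PySem.List.pyGet? pvSymbols (key.size : Int)).getD ' ')).getD item ' '],
           if key.contains item then key
            else key.insert item ((PySem.List.pyGet? pvSymbols (key.size : Int)).getD ' ')) := by
        simp [pvStep, hair]
      set key' := if key.contains item then key
            else key.insert item ((PySem.List.pyGet? pvSymbols (key.size : Int)).getD ' ') with hkey'
      have hk' : ∀ v ∈ key'.values, v ≠ ' ' := by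
        rw [hkey']
        split
        · exact hk
        · intro v hv
          rcases PySem.Dict.mem_values_insert _ _ _ _ hv with h | h
          · subst h
            exact pvSym_ne key.size (by simp at hsz; omega)
          · exact hk v h
      have hsz' : key'.size + l.length ≤ 9 := by
        have : key'.size ≤ key.size + 1 := by
          rw [hkey']; split
          · omega
          · rw [PySem.Dict.size_insert]; split <;> omega
        simp at hsz; omega
      have hch : key'.getD item ' ' ≠ ' ' := by
        rw [hkey']
        split
        · exact pvGetD_ne_space key item hk (by assumption)
        · rw [PySem.Dict.getD_insert_self]
          exact pvSym_ne key.size (by simp at hsz; omega)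
      obtain ⟨ext, he, hlen, hiff⟩ := ih (pat ++ [key'.getD item ' ']) key' hk' hsz'
      refine ⟨key'.getD item ' ' :: ext, ?_, by simp [hlen], ?_⟩
      · rw [List.foldl_cons, hstep]
        simpa [List.append_assoc] using he
      · intro i hi
        cases i with
        | zero => simpa using ⟨fun h => absurd h hch, fun h => absurd h hair⟩
        | succ j => simpa using hiff j (by simpa using Nat.lt_of_succ_lt_succ hi)

theorem pvBuild_spec (grid : List String) (h9 : 9 ≤ grid.length) :
    (pvBuild grid).1.length = 9 ∧
      (∀ i, i < 9 → (((pvBuild grid).1.getD i ' ' = ' ') ↔ pvAir grid i = true)) := by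
  have hsl : PySem.List.slice grid none (some 9) = grid.take 9 := by
    rw [PySem.List.slice_to grid (by norm_num)]; congr 1
  obtain ⟨ext, he, hlen, hiff⟩ := pvBuildLoop (grid.take 9) [] PySem.Dict.empty (by simp [PySem.Dict.values, PySem.Dict.empty]) (by simp)
  have hl9 : (grid.take 9).length = 9 := by simp [h9]
  constructor
  · rw [pvBuild, hsl, he]; simp [hlen, hl9]
  · intro i hi
    rw [pvBuild, hsl, he]
    simp only [List.nil_append]
    rw [pvAir]
    have : PySem.List.pyGet? grid (i : Int) = grid[i]? := by simp
    rw [this, List.getElem?_eq_getElem (by omega)]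
    have hgd : (grid.take 9).getD i "" = grid[i] := by
      rw [List.getD_eq_getElem _ _ (by omega)]
      simp [List.getElem_take]
    have := hiff i (by omega)
    rw [hgd] at this
    rw [this]
    simp

theorem pvList9 (p : List Char) (h : p.length = 9) :
    ∃ a0 a1 a2 a3 a4 a5 a6 a7 a8, p = [a0, a1, a2, a3, a4, a5, a6, a7, a8] := by
  rcases p with _ | ⟨a0, p⟩; · simp at h
  rcases p with _ | ⟨a1, p⟩; · simp at h
  rcases p with _ | ⟨a2, p⟩; · simp at h
  rcases p with _ | ⟨a3, p⟩; · simp at h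
  rcases p with _ | ⟨a4, p⟩; · simp at h
  rcases p with _ | ⟨a5, p⟩; · simp at h
  rcases p with _ | ⟨a6, p⟩; · simp at h
  rcases p with _ | ⟨a7, p⟩; · simp at h
  rcases p with _ | ⟨a8, p⟩; · simp at h
  rcases p with _ | ⟨a9, p⟩
  · exact ⟨a0, a1, a2, a3, a4, a5, a6, a7, a8, rfl⟩
  · simp at h

-- A's buggy removal of "column 2" from a kept row (space, x, space): list.remove hits the
-- leading space, so the row becomes "x " instead of the intended " x".
theorem pvRow_2bug (x : Char) : pvRowProc [2] 0 [' ', x, ' '] = [x, ' '] := by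
  simp [pvRowProc, PySem.List.remove?, PySem.List.pyGet?, PySem.List.pyIdx?,
    List.idxOf?, List.findIdx?, List.findIdx?.go]

-- inside the change region the two prunings always differ
theorem pvPrune_ne (c0 c1 c3 c4 c6 c7 : Char)
    (hw : (c0 = ' ' ∧ ¬c1 = ' ') ∨ (c3 = ' ' ∧ ¬c4 = ' ') ∨ (c6 = ' ' ∧ ¬c7 = ' '))
    (hn : ¬c0 = ' ' ∨ ¬c3 = ' ' ∨ ¬c6 = ' ') :
    pvPruneA [c0, c1, ' ', c3, c4, ' ', c6, c7, ' '] ≠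
      pvPruneB [c0, c1, ' ', c3, c4, ' ', c6, c7, ' '] := by
  have hKR : pvKeptRows [c0, c1, ' ', c3, c4, ' ', c6, c7, ' '] =
      [[c0, c1, ' '], [c3, c4, ' '], [c6, c7, ' ']].filter (fun r => !(r == [' ', ' ', ' '])) := rfl
  -- every kept row has a space in column 2
  have hsp2 : pvSp [c0, c1, ' ', c3, c4, ' ', c6, c7, ' '] 2 = true := by
    apply List.all_eq_true.mpr
    intro r hr
    have hmem := (List.mem_filter.mp (hKR ▸ hr)).1
    simp only [List.mem_cons, List.not_mem_nil, or_false] at hmem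
    rcases hmem with rfl | rfl | rfl <;> simp [PySem.List.pyGet?, PySem.List.pyIdx?]
  -- some kept row has a non-space in column 0
  have hsp0 : pvSp [c0, c1, ' ', c3, c4, ' ', c6, c7, ' '] 0 = false := by
    rw [Bool.eq_false_iff]
    intro hall
    rcases hn with h | h | h
    · have hm : [c0, c1, ' '] ∈ pvKeptRows [c0, c1, ' ', c3, c4, ' ', c6, c7, ' '] := by
        rw [hKR]; exact List.mem_filter.mpr ⟨by simp, by simp [h]⟩
      have := List.all_eq_true.mp hall _ hm
      simp [PySem.List.pyGet?, PySem.List.pyIdx?] at this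
      exact h this
    · have hm : [c3, c4, ' '] ∈ pvKeptRows [c0, c1, ' ', c3, c4, ' ', c6, c7, ' '] := by
        rw [hKR]; exact List.mem_filter.mpr ⟨by simp, by simp [h]⟩
      have := List.all_eq_true.mp hall _ hm
      simp [PySem.List.pyGet?, PySem.List.pyIdx?] at this
      exact h this
    · have hm : [c6, c7, ' '] ∈ pvKeptRows [c0, c1, ' ', c3, c4, ' ', c6, c7, ' '] := by
        rw [hKR]; exact List.mem_filter.mpr ⟨by simp, by simp [h]⟩
      have := List.all_eq_true.mp hall _ hm
      simp [PySem.List.pyGet?, PySem.List.pyIdx?] at this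
      exact h this
  -- the witness (space, x, space) row has a non-space in column 1
  have hsp1 : pvSp [c0, c1, ' ', c3, c4, ' ', c6, c7, ' '] 1 = false := by
    rw [Bool.eq_false_iff]
    intro hall
    rcases hw with ⟨_, h⟩ | ⟨_, h⟩ | ⟨_, h⟩
    · have hm : [c0, c1, ' '] ∈ pvKeptRows [c0, c1, ' ', c3, c4, ' ', c6, c7, ' '] := by
        rw [hKR]; exact List.mem_filter.mpr ⟨by simp, by simp [h]⟩
      have := List.all_eq_true.mp hall _ hm
      simp [PySem.List.pyGet?, PySem.List.pyIdx?] at this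
      exact h this
    · have hm : [c3, c4, ' '] ∈ pvKeptRows [c0, c1, ' ', c3, c4, ' ', c6, c7, ' '] := by
        rw [hKR]; exact List.mem_filter.mpr ⟨by simp, by simp [h]⟩
      have := List.all_eq_true.mp hall _ hm
      simp [PySem.List.pyGet?, PySem.List.pyIdx?] at this
      exact h this
    · have hm : [c6, c7, ' '] ∈ pvKeptRows [c0, c1, ' ', c3, c4, ' ', c6, c7, ' '] := by
        rw [hKR]; exact List.mem_filter.mpr ⟨by simp, by simp [h]⟩
      have := List.all_eq_true.mp hall _ hm
      simp [PySem.List.pyGet?, PySem.List.pyIdx?] at this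
      exact h this
  rw [pvA_eq, pvB_eq, pvColsA_eq, pvColsB_eq]
  simp only [hsp0, hsp1, hsp2, List.filter_cons, List.filter_nil, Bool.not_true, Bool.not_false,
    if_true, if_false, Bool.false_eq_true]
  intro heq
  rcases hw with ⟨ha, hb⟩ | ⟨ha, hb⟩ | ⟨ha, hb⟩
  · subst ha
    have hm : [' ', c1, ' '] ∈ pvKeptRows [' ', c1, ' ', c3, c4, ' ', c6, c7, ' '] := by
      rw [hKR]; exact List.mem_filter.mpr ⟨by simp, by simp [hb]⟩
    have hfw := (List.map_eq_map_iff.mp heq) _ hm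
    rw [pvRow_2bug c1] at hfw
    have h' := congrArg String.toList hfw
    simp [PySem.List.pyGet?, PySem.List.pyIdx?] at h'
    exact hb h'.1
  · subst ha
    have hm : [' ', c4, ' '] ∈ pvKeptRows [c0, c1, ' ', ' ', c4, ' ', c6, c7, ' '] := by
      rw [hKR]; exact List.mem_filter.mpr ⟨by simp, by simp [hb]⟩
    have hfw := (List.map_eq_map_iff.mp heq) _ hm
    rw [pvRow_2bug c4] at hfw
    have h' := congrArg String.toList hfw
    simp [PySem.List.pyGet?, PySem.List.pyIdx?] at h'
    exact hb h'.1
  · subst ha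
    have hm : [' ', c7, ' '] ∈ pvKeptRows [c0, c1, ' ', c3, c4, ' ', ' ', c7, ' '] := by
      rw [hKR]; exact List.mem_filter.mpr ⟨by simp, by simp [hb]⟩
    have hfw := (List.map_eq_map_iff.mp heq) _ hm
    rw [pvRow_2bug c7] at hfw
    have h' := congrArg String.toList hfw
    simp [PySem.List.pyGet?, PySem.List.pyIdx?] at h'
    exact hb h'.1

-- ===== VERDICT (by name: the statement is the Claim_ definition above) =====
theorem get_pattern_from_list_spec : Claim_unchanged_get_pattern_from_list := by
  intro grid hdom hpre hD
  obtain ⟨hlen, hiff⟩ := pvBuild_spec grid hpre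
  obtain ⟨c0, c1, c2, c3, c4, c5, c6, c7, c8, hp⟩ := pvList9 _ hlen
  have e : ∀ i, i < 9 → (((pvBuild grid).1.getD i ' ') == ' ') = pvAir grid i := by
    intro i hi
    by_cases hA : pvAir grid i = true
    · rw [(hiff i hi).mpr hA, hA]; rfl
    · have hne : ¬((pvBuild grid).1.getD i ' ' = ' ') := fun hc => hA ((hiff i hi).mp hc)
      simp only [Bool.not_eq_true] at hA
      rw [hA]
      exact beq_eq_false_iff_ne.mpr hne
  have e' : ∀ i, i < 9 → (([c0, c1, c2, c3, c4, c5, c6, c7, c8].getD i ' ') == ' ') = pvAir grid i := by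
    rw [← hp]; exact e
  have e0 := e' 0 (by omega); have e1 := e' 1 (by omega); have e2 := e' 2 (by omega)
  have e3 := e' 3 (by omega); have e4 := e' 4 (by omega); have e5 := e' 5 (by omega)
  have e6 := e' 6 (by omega); have e7 := e' 7 (by omega); have e8 := e' 8 (by omega)
  simp only [List.getD_cons_zero, List.getD_cons_succ] at e0 e1 e2 e3 e4 e5 e6 e7 e8
  have hmask : pvDMask (c0 == ' ') (c1 == ' ') (c2 == ' ') (c3 == ' ') (c4 == ' ') (c5 == ' ')
      (c6 == ' ') (c7 == ' ') (c8 == ' ') = false := by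
    rw [pvDMask_eq, e0, e1, e2, e3, e4, e5, e6, e7, e8]
    rw [D_get_pattern_from_list] at hD
    exact Bool.not_eq_true _ ▸ hD
  show get_pattern_from_list grid = get_pattern_from_list_alt grid
  rw [get_pattern_from_list, get_pattern_from_list_alt]
  rw [Prod.mk.injEq]
  refine ⟨?_, rfl⟩
  rw [hp]
  exact pvPrune_eq c0 c1 c2 c3 c4 c5 c6 c7 c8 hmask

theorem get_pattern_from_list_changed : Claim_changed_get_pattern_from_list := by
  unfold Claim_changed_get_pattern_from_list; decide

set_option maxHeartbeats 1600000 in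
theorem get_pattern_from_list_tight : Claim_exact_get_pattern_from_list := by
  intro grid hdom hpre hD
  obtain ⟨hlen, hiff⟩ := pvBuild_spec grid hpre
  obtain ⟨c0, c1, c2, c3, c4, c5, c6, c7, c8, hp⟩ := pvList9 _ hlen
  have e : ∀ i, i < 9 → (((pvBuild grid).1.getD i ' ') == ' ') = pvAir grid i := by
    intro i hi
    by_cases hA : pvAir grid i = true
    · rw [(hiff i hi).mpr hA, hA]; rfl
    · have hne : ¬((pvBuild grid).1.getD i ' ' = ' ') := fun hc => hA ((hiff i hi).mp hc)
      simp only [Bool.not_eq_true] at hA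
      rw [hA]
      exact beq_eq_false_iff_ne.mpr hne
  have e' : ∀ i, i < 9 → (([c0, c1, c2, c3, c4, c5, c6, c7, c8].getD i ' ') == ' ') = pvAir grid i := by
    rw [← hp]; exact e
  have e0 := e' 0 (by omega); have e1 := e' 1 (by omega); have e2 := e' 2 (by omega)
  have e3 := e' 3 (by omega); have e4 := e' 4 (by omega); have e5 := e' 5 (by omega)
  have e6 := e' 6 (by omega); have e7 := e' 7 (by omega); have e8 := e' 8 (by omega)
  simp only [List.getD_cons_zero, List.getD_cons_succ] at e0 e1 e2 e3 e4 e5 e6 e7 e8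
  rw [D_get_pattern_from_list] at hD
  rw [← e0, ← e1, ← e2, ← e3, ← e4, ← e5, ← e6, ← e7, ← e8] at hD
  rw [Bool.and_eq_true, Bool.and_eq_true] at hD
  obtain ⟨⟨hW, hC⟩, hN⟩ := hD
  simp only [Bool.or_eq_true, Bool.and_eq_true, Bool.not_eq_true', beq_iff_eq,
    beq_eq_false_iff_ne, ne_eq] at hW hC hN
  have hc2 : c2 = ' ' := by tauto
  have hc5 : c5 = ' ' := by tauto
  have hc8 : c8 = ' ' := by tauto
  subst hc2; subst hc5; subst hc8
  intro hABeq
  have h1 : pvPruneA (pvBuild grid).1 = pvPruneB (pvBuild grid).1 := by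
    have := congrArg Prod.fst hABeq
    simpa [get_pattern_from_list, get_pattern_from_list_alt] using this
  rw [hp] at h1
  exact pvPrune_ne c0 c1 c3 c4 c6 c7 (by tauto) (by tauto) h1
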